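-- pv_equiv track=rewrite | github.com/Kawser-nerd/CLCDSA | Source Codes/CodeJamData/17/42/14.py | getNumRides
-- ===== SOURCE A (Python) =====
-- def getNumRides(ticketCustomerPairs, numSeats, numCusts):
--     custCounts = {}
--     seatCounts = {}
--     for i in range(1, numCusts+1):
--         custCounts[i] = 0
--     for i in range(1, numSeats+1):
--         seatCounts[i] = 0
--     for (pi, ci) in ticketCustomerPairs:
--         custCounts[ci] += 1
--         seatCounts[pi] += 1
--
--     lowerBound = max(custCounts.values())
--     freeSeats = 0
--     for i in range(1, numSeats+1):
--         if seatCounts[i] <= lowerBound: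
--             freeSeats += lowerBound - seatCounts[i]
--         else:
--             freeSeats -= seatCounts[i] - lowerBound
--             while freeSeats < 0:
--                 lowerBound += 1
--                 freeSeats += i
--     # lowerBound should be right
--     upgrades = 0
--     for i in range(1, numSeats+1):
--         if seatCounts[i] > lowerBound:
--             upgrades += seatCounts[i]-lowerBound
--     return lowerBound, upgrades
-- ===== SOURCE B (Python) =====
-- def getNumRides(ticketCustomerPairs, numSeats, numCusts):
--     # count with flat arrays instead of dicts
--     custCounts = [0] * numCusts
--     seatCounts = [0] * numSeats
--     for pi, ci in ticketCustomerPairs: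
--         custCounts[ci - 1] += 1
--         seatCounts[pi - 1] += 1
--     # lowerBound = max(busiest customer, max over seats i of ceil(prefix_i / i)):
--     # closed ceiling-division formula instead of the incremental freeSeats
--     # accumulator with its inner while loop.
--     lowerBound = max(custCounts)
--     prefix = 0
--     for i, c in enumerate(seatCounts, 1):
--         prefix += c
--         need = -(-prefix // i)
--         if lowerBound < need:
--             lowerBound = need
--     upgrades = sum(c - lowerBound for c in seatCounts if c > lowerBound)
--     return lowerBound, upgrades
-- ===== Notes on version B (the rewrite author's own statement) =====
-- stated objective: faster
-- what changed: B counts into flat zero-initialised arrays instead of dicts and derives the lower bound in one prefix-sum pass as the max of the busiest customer and ceil(prefix_i/i) (integer ceiling division) over seats, replacing A's incremental freeSeats accumulator whose inner while loop bumps the bound one ride at a time; upgrades become a filtered sum.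
import Mathlib
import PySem

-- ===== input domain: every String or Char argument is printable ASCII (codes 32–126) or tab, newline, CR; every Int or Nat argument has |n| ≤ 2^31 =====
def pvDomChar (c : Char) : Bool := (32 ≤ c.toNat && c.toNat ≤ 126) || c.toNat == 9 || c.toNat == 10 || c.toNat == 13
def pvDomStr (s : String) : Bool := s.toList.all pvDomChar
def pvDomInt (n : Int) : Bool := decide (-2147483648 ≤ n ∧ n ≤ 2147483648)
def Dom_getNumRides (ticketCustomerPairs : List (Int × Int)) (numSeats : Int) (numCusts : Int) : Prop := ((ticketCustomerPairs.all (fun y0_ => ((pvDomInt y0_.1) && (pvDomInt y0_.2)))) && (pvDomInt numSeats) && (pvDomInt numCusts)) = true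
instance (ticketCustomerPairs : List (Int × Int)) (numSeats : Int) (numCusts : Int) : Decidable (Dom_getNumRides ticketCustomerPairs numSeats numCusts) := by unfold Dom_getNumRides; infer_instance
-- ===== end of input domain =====

-- B counts into flat arrays instead of dicts and computes the rides lower bound by a
-- prefix-sum / ceiling-division pass instead of A's incremental freeSeats accumulator
-- with its inner while loop (alternative decomposition, same cost class).


-- ===== PORT A =====
-- the inner 'while freeSeats < 0: lowerBound += 1; freeSeats += i' loop;
-- the '1 ≤ i' conjunct is only a totality guard: every call site passes i from range(1, numSeats+1)
def pvBump (i lb fs : Int) : Int × Int :=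
  if _h : fs < 0 ∧ 1 ≤ i then pvBump i (lb + 1) (fs + i) else (lb, fs)
termination_by (-fs).toNat
decreasing_by omega

def getNumRides (ticketCustomerPairs : List (Int × Int)) (numSeats : Int) (numCusts : Int) : Int × Int :=
  let cc0 : PySem.Dict Int Int := (PySem.List.pyRange 1 (numCusts + 1) 1).foldl (fun d i => PySem.Dict.insert d i 0) PySem.Dict.empty
  let sc0 : PySem.Dict Int Int := (PySem.List.pyRange 1 (numSeats + 1) 1).foldl (fun d i => PySem.Dict.insert d i 0) PySem.Dict.empty
  -- 'custCounts[ci] += 1; seatCounts[pi] += 1' (KeyError on a missing key: outside Pre_)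
  let st := ticketCustomerPairs.foldl
    (fun (st : PySem.Dict Int Int × PySem.Dict Int Int) pc =>
      (PySem.Dict.modify st.1 pc.2 0 (· + 1), PySem.Dict.modify st.2 pc.1 0 (· + 1)))
    (cc0, sc0)
  -- max() of an empty dict raises ValueError in Python: outside Pre_; the default 0 is unreachable under Pre_
  let lowerBound : Int := (PySem.List.max? (PySem.Dict.values st.1) (fun y => y)).getD 0
  let r := (PySem.List.pyRange 1 (numSeats + 1) 1).foldl
    (fun (s : Int × Int) i =>
      let c := PySem.Dict.getD st.2 i 0
      if c ≤ s.1 then (s.1, s.2 + (s.1 - c)) else pvBump i s.1 (s.2 - (c - s.1)))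
    (lowerBound, 0)
  let upgrades := (PySem.List.pyRange 1 (numSeats + 1) 1).foldl
    (fun (u : Int) i =>
      let c := PySem.Dict.getD st.2 i 0
      if r.1 < c then u + (c - r.1) else u) 0
  (r.1, upgrades)

-- ===== PORT B =====
def getNumRides_alt (ticketCustomerPairs : List (Int × Int)) (numSeats : Int) (numCusts : Int) : Int × Int :=
  -- 'custCounts[ci - 1] += 1; seatCounts[pi - 1] += 1' on flat arrays (pySetD/pyGetD are Python-exact indexing)
  let st := ticketCustomerPairs.foldl
    (fun (s : List Int × List Int) pc =>
      (PySem.List.pySetD s.1 (pc.2 - 1) (PySem.List.pyGetD s.1 (pc.2 - 1) 0 + 1),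
       PySem.List.pySetD s.2 (pc.1 - 1) (PySem.List.pyGetD s.2 (pc.1 - 1) 0 + 1)))
    (List.replicate numCusts.toNat 0, List.replicate numSeats.toNat 0)
  -- max() of an empty list raises ValueError in Python: outside Pre_; the default 0 is unreachable under Pre_
  let lb0 : Int := (PySem.List.max? st.1 (fun y => y)).getD 0
  -- 'for i, c in enumerate(seatCounts, 1): prefix += c; need = -(-prefix // i); …'
  let r := st.2.foldl
    (fun (s : Int × Int × Int) c =>
      let q := s.2.2 + c
      let need := -(PySem.Int.floordiv (-q) s.1)
      (s.1 + 1, if s.2.1 < need then need else s.2.1, q))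
    (1, lb0, 0)
  let upgrades := ((st.2.filter (fun c => r.2.1 < c)).map (fun c => c - r.2.1)).sum
  (r.2.1, upgrades)

-- ===== PRECONDITION & SPEC =====
-- Pre_ excludes exactly the inputs on which A raises: numCusts < 1 (max() of the then-empty
-- custCounts.values() raises ValueError) and pairs whose customer / seat id lies outside
-- 1..numCusts / 1..numSeats (KeyError in A's counting loop).
def Pre_getNumRides (ticketCustomerPairs : List (Int × Int)) (numSeats : Int) (numCusts : Int) : Prop :=
  1 ≤ numCusts ∧ ∀ pc ∈ ticketCustomerPairs, 1 ≤ pc.1 ∧ pc.1 ≤ numSeats ∧ 1 ≤ pc.2 ∧ pc.2 ≤ numCusts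
instance (ticketCustomerPairs : List (Int × Int)) (numSeats : Int) (numCusts : Int) : Decidable (Pre_getNumRides ticketCustomerPairs numSeats numCusts) := by unfold Pre_getNumRides; infer_instance

def pvWitness_getNumRides : (List (Int × Int)) × Int × Int := ([(1, 1), (1, 2), (2, 1)], 2, 2)

def Spec_getNumRides (ticketCustomerPairs : List (Int × Int)) (numSeats : Int) (numCusts : Int) (out : Int × Int) : Prop := out = getNumRides_alt ticketCustomerPairs numSeats numCusts
instance (ticketCustomerPairs : List (Int × Int)) (numSeats : Int) (numCusts : Int) (out : Int × Int) : Decidable (Spec_getNumRides ticketCustomerPairs numSeats numCusts out) := by unfold Spec_getNumRides; infer_instance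

-- ===== CLAIM (what is proved, stated in full; the proofs are below) =====
def Claim_equal_getNumRides : Prop := ∀ (ticketCustomerPairs : List (Int × Int)) (numSeats : Int) (numCusts : Int), Dom_getNumRides ticketCustomerPairs numSeats numCusts → Pre_getNumRides ticketCustomerPairs numSeats numCusts → Spec_getNumRides ticketCustomerPairs numSeats numCusts (getNumRides ticketCustomerPairs numSeats numCusts)

-- ===== LEMMAS AND PROOFS =====

-- the inner while loop adds exactly max 0 ⌈-fs/i⌉ rides
theorem pvBump_eq (i lb fs : Int) (hi : 1 ≤ i) :
    pvBump i lb fs = (lb + max 0 (-(PySem.Int.floordiv fs i)), fs + max 0 (-(PySem.Int.floordiv fs i)) * i) := by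
  fun_induction pvBump i lb fs with
  | case1 lb fs h ih =>
    rw [ih, PySem.Int.floordiv_eq_ediv_of_pos (show (0:Int) < i by omega),
        PySem.Int.floordiv_eq_ediv_of_pos (show (0:Int) < i by omega)]
    have h1 : (fs + i) / i = fs / i + 1 := by
      have := Int.add_mul_ediv_right fs 1 (by omega : i ≠ 0)
      simpa using this
    have h2 : fs / i < 0 := Int.ediv_neg_of_neg_of_pos h.1 (by omega)
    have hM : max 0 (-((fs + i) / i)) = max 0 (-(fs / i)) - 1 := by rw [h1]; omega
    rw [hM]
    simp only [Prod.mk.injEq]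
    exact ⟨by omega, by ring⟩
  | case2 lb fs h =>
    rw [PySem.Int.floordiv_eq_ediv_of_pos (show (0:Int) < i by omega)]
    have h0 : 0 ≤ fs / i := Int.ediv_nonneg (by omega) (by omega)
    have : max 0 (-(fs / i)) = 0 := by omega
    rw [this]; simp

-- one step of A's freeSeats loop equals one prefix/ceiling step,
-- and preserves 0 ≤ freeSeats = i*lowerBound - prefix
theorem step_eq (c : Int → Int) (k lb p : Int) (hk : 1 ≤ k) (hfs : 0 ≤ (k - 1) * lb - p) :
    ((if c k ≤ lb then (lb, ((k - 1) * lb - p) + (lb - c k))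
      else pvBump k lb (((k - 1) * lb - p) - (c k - lb)))
    = (let p1 := p + c k
       let need := -(PySem.Int.floordiv (-p1) k)
       let lb1 := if lb < need then need else lb
       (lb1, k * lb1 - p1)))
    ∧ 0 ≤ k * (let p1 := p + c k
               let need := -(PySem.Int.floordiv (-p1) k)
               if lb < need then need else lb) - (p + c k) := by
  have hk0 : (0:Int) < k := by omega
  set p1 : Int := p + c k with hp1
  set fd : Int := PySem.Int.floordiv (-p1) k with hfd
  have F1 : fd * k ≤ -p1 := (PySem.Int.le_floordiv_iff_mul_le hk0).mp le_rfl
  have F2 : -p1 < (fd + 1) * k := (PySem.Int.floordiv_lt_iff_lt_mul hk0).mp (by omega)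
  simp only []
  by_cases hc : c k ≤ lb
  · have hnlt : ¬ lb < -fd := by
      intro hlt
      nlinarith [hfs, F2]
    rw [if_pos hc, if_neg hnlt]
    refine ⟨Prod.ext (by rfl) (by ring), by nlinarith⟩
  · have hdv : PySem.Int.floordiv (k * lb - p1) k = lb + fd := by
      rw [hfd, PySem.Int.floordiv_eq_ediv_of_pos hk0, PySem.Int.floordiv_eq_ediv_of_pos hk0]
      have : k * lb - p1 = -p1 + lb * k := by ring
      rw [this, Int.add_mul_ediv_right _ _ (by omega : k ≠ 0)]
      ring
    have hlhs : ((k - 1) * lb - p) - (c k - lb) = k * lb - p1 := by rw [hp1]; ring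
    rw [if_neg hc, hlhs, pvBump_eq k lb _ hk, hdv]
    by_cases hlt : lb < -fd
    · rw [if_pos hlt]
      have hq : max 0 (-(lb + fd)) = -fd - lb := by omega
      rw [hq]
      refine ⟨?_, by nlinarith⟩
      simp only [Prod.mk.injEq]
      exact ⟨by omega, by ring⟩
    · rw [if_neg hlt]
      have hq : max 0 (-(lb + fd)) = 0 := by omega
      rw [hq]
      refine ⟨?_, by nlinarith⟩
      simp only [Prod.mk.injEq]
      exact ⟨by omega, by ring⟩

-- invariant over the whole range: A's (lowerBound, freeSeats) fold and the
-- (lowerBound, prefix) fold produce the same lowerBound, with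
-- freeSeats = lastIndex*lowerBound - prefix ≥ 0
theorem loop_eq (c : Int → Int) (n : ℕ) :
    ∀ (k lb p : Int), 1 ≤ k → 0 ≤ (k - 1) * lb - p →
    ∃ lb' p',
      ((PySem.List.pyRange k (k + (n : Int)) 1).foldl
        (fun (s : Int × Int) i => if c i ≤ s.1 then (s.1, s.2 + (s.1 - c i)) else pvBump i s.1 (s.2 - (c i - s.1)))
        (lb, (k - 1) * lb - p) = (lb', (k + (n : Int) - 1) * lb' - p'))
      ∧ ((PySem.List.pyRange k (k + (n : Int)) 1).foldl
        (fun (s : Int × Int) i =>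
          let q := s.2 + c i
          let need := -(PySem.Int.floordiv (-q) i)
          (if s.1 < need then need else s.1, q))
        (lb, p) = (lb', p'))
      ∧ 0 ≤ (k + (n : Int) - 1) * lb' - p' := by
  induction n with
  | zero =>
    intro k lb p hk hfs
    rw [show ((0:ℕ):Int) = 0 from rfl, add_zero, PySem.List.pyRange_one_eq_nil le_rfl]
    exact ⟨lb, p, rfl, rfl, hfs⟩
  | succ n ih =>
    intro k lb p hk hfs
    have hcons : PySem.List.pyRange k (k + ((n + 1 : ℕ) : Int)) 1
        = k :: PySem.List.pyRange (k + 1) ((k + 1) + ((n : ℕ) : Int)) 1 := by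
      rw [PySem.List.pyRange_one_cons (by push_cast; omega)]
      congr 2
      push_cast; ring
    rw [hcons]
    simp only [List.foldl_cons]
    obtain ⟨hstep, hpos⟩ := step_eq c k lb p hk hfs
    simp only [] at hstep hpos ⊢
    rw [hstep]
    set p1 : Int := p + c k with hp1
    set need : Int := -(PySem.Int.floordiv (-p1) k) with hneed
    set lb1 : Int := if lb < need then need else lb with hlb1
    have hfs1 : 0 ≤ ((k + 1) - 1) * lb1 - p1 := by
      have : ((k + 1) - 1) * lb1 - p1 = k * lb1 - p1 := by ring
      rw [this]; exact hpos
    obtain ⟨lb', p', hA, hB, hpos'⟩ := ih (k + 1) lb1 p1 (by omega) hfs1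
    refine ⟨lb', p', ?_, ?_, ?_⟩
    · have h2 : k * lb1 - p1 = ((k + 1) - 1) * lb1 - p1 := by ring
      rw [h2, hA]
      have h3 : (k + 1 + (n : Int) - 1) = (k + ((n + 1 : ℕ) : Int) - 1) := by push_cast; ring
      rw [h3]
    · exact hB
    · have h3 : (k + 1 + (n : Int) - 1) = (k + ((n + 1 : ℕ) : Int) - 1) := by push_cast; ring
      rw [← h3]; exact hpos'

-- B's indexed fold over (pyRange a (a+n) 1).map f IS the (lowerBound, prefix) fold over the range
theorem loopB_map (f : Int → Int) (n : ℕ) :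
    ∀ (a lb p : Int),
    ((PySem.List.pyRange a (a + (n : Int)) 1).map f).foldl
      (fun (s : Int × Int × Int) c =>
        let q := s.2.2 + c
        let need := -(PySem.Int.floordiv (-q) s.1)
        (s.1 + 1, if s.2.1 < need then need else s.2.1, q))
      (a, lb, p)
    = (a + (n : Int),
       (PySem.List.pyRange a (a + (n : Int)) 1).foldl
        (fun (s : Int × Int) i =>
          let q := s.2 + f i
          let need := -(PySem.Int.floordiv (-q) i)
          (if s.1 < need then need else s.1, q))
        (lb, p)) := by
  induction n with
  | zero =>
    intro a lb p
    rw [show ((0:ℕ):Int) = 0 from rfl, add_zero, PySem.List.pyRange_one_eq_nil le_rfl]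
    rfl
  | succ n ih =>
    intro a lb p
    have hcons : PySem.List.pyRange a (a + ((n + 1 : ℕ) : Int)) 1
        = a :: PySem.List.pyRange (a + 1) ((a + 1) + ((n : ℕ) : Int)) 1 := by
      rw [PySem.List.pyRange_one_cons (by push_cast; omega)]
      congr 2
      push_cast; ring
    rw [hcons]
    simp only [List.map_cons, List.foldl_cons]
    rw [ih (a + 1)]
    have h3 : (a + 1 + (n : Int)) = (a + ((n + 1 : ℕ) : Int)) := by push_cast; ring
    rw [h3]

-- a zero-initialising insert loop leaves every getD-at-0 lookup 0
theorem getD_init_zero (xs : List Int) : ∀ (d : PySem.Dict Int Int) (k : Int), d.getD k 0 = 0 →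
    ((xs.foldl (fun d i => PySem.Dict.insert d i 0) d).getD k 0) = 0 := by
  induction xs with
  | nil => intro d k h; exact h
  | cons x t ih =>
    intro d k h
    simp only [List.foldl_cons]
    exact ih _ k (by rw [PySem.Dict.getD_insert]; split <;> simp [h])

-- updating a set with elements it already has is the identity
theorem set_update_id (l : List Int) : ∀ (s : PySem.Set Int), (∀ x ∈ l, x ∈ s) → PySem.Set.update s l = s := by
  induction l with
  | nil => intro s _; exact PySem.Set.update_nil s
  | cons x t ih =>
    intro s h
    rw [PySem.Set.update_cons, PySem.Set.add_of_mem (h x (by simp))]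
    exact ih s (fun y hy => h y (by simp [hy]))

-- the array counting loop: element j of the result counts key j+1
theorem foldInc_length (l : List Int) : ∀ (arr : List Int),
    (l.foldl (fun a k => PySem.List.pySetD a (k - 1) (PySem.List.pyGetD a (k - 1) 0 + 1)) arr).length = arr.length := by
  induction l with
  | nil => intro arr; rfl
  | cons x t ih =>
    intro arr
    simp only [List.foldl_cons]
    rw [ih, PySem.List.length_pySetD]

theorem foldInc_getD (l : List Int) : ∀ (arr : List Int),
    (∀ k ∈ l, 1 ≤ k ∧ k ≤ (arr.length : Int)) → ∀ (j : ℕ), j < arr.length →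
    (l.foldl (fun a k => PySem.List.pySetD a (k - 1) (PySem.List.pyGetD a (k - 1) 0 + 1)) arr).getD j 0
      = arr.getD j 0 + l.count ((j : Int) + 1) := by
  induction l with
  | nil => intro arr _ j hj; simp
  | cons x t ih =>
    intro arr hb j hj
    obtain ⟨hx1, hx2⟩ := hb x (by simp)
    have hxr : (x - 1).toNat < arr.length := by omega
    have hset : PySem.List.pySetD arr (x - 1) (PySem.List.pyGetD arr (x - 1) 0 + 1)
        = arr.set (x - 1).toNat (PySem.List.pyGetD arr (x - 1) 0 + 1) :=
      PySem.List.pySetD_of_nonneg arr _ (by omega)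
    have hget : PySem.List.pyGetD arr (x - 1) 0 = arr.getD (x - 1).toNat 0 := by
      rw [PySem.List.pyGetD_eq_getElem arr 0 (by omega) (show x - 1 < (arr.length:Int) by omega)]
      rw [List.getD_eq_getElem _ _ hxr]
    simp only [List.foldl_cons]
    rw [hset,
        ih _ (fun k hk => by simpa [List.length_set] using hb k (List.mem_cons_of_mem _ hk)) j (by simpa using hj),
        List.count_cons]
    by_cases hje : (x - 1).toNat = j
    · have hbeq : (x == (j:Int) + 1) = true := by simp; omega
      rw [hbeq]
      rw [List.getD_eq_getElem _ _ (by simpa using hj), List.getElem_set, if_pos hje, hget, ← hje,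
          List.getD_eq_getElem _ _ hxr]
      simp only []
      push_cast; ring
    · have hbeq : (x == (j:Int) + 1) = false := by simp; omega
      rw [hbeq]
      rw [List.getD_eq_getElem _ _ (by simpa using hj), List.getElem_set, if_neg hje,
          List.getD_eq_getElem _ _ hj]
      simp only [Bool.false_eq_true, if_false]
      push_cast; ring

-- A's upgrade fold over the index range IS B's filtered sum over the mapped counts
theorem upg_range (f : Int → Int) (lb : Int) (n : ℕ) : ∀ (a u0 : Int),
    (PySem.List.pyRange a (a + (n : Int)) 1).foldl (fun u i => if lb < f i then u + (f i - lb) else u) u0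
      = u0 + ((((PySem.List.pyRange a (a + (n : Int)) 1).map f).filter (fun c => lb < c)).map (fun c => c - lb)).sum := by
  induction n with
  | zero =>
    intro a u0
    rw [show ((0:ℕ):Int) = 0 from rfl, add_zero, PySem.List.pyRange_one_eq_nil le_rfl]
    simp
  | succ n ih =>
    intro a u0
    have hcons : PySem.List.pyRange a (a + ((n + 1 : ℕ) : Int)) 1
        = a :: PySem.List.pyRange (a + 1) ((a + 1) + ((n : ℕ) : Int)) 1 := by
      rw [PySem.List.pyRange_one_cons (by push_cast; omega)]
      congr 2
      push_cast; ring
    rw [hcons]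
    simp only [List.foldl_cons, List.map_cons, List.filter_cons]
    by_cases h : lb < f a
    · rw [if_pos h, ih (a + 1)]
      simp [h, add_assoc]
    · rw [if_neg h, ih (a + 1)]
      simp [h]

-- the counting phases agree: both count dicts/arrays read back as the same per-key counts
theorem counts_eq (tcp : List (Int × Int)) (n : Int) (key : Int × Int → Int)
    (hb : ∀ pc ∈ tcp, 1 ≤ key pc ∧ key pc ≤ n) :
    (tcp.foldl (fun a pc => PySem.List.pySetD a (key pc - 1) (PySem.List.pyGetD a (key pc - 1) 0 + 1))
        (List.replicate n.toNat (0:Int)))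
    = (PySem.List.pyRange 1 (n + 1) 1).map
        (fun k => ((tcp.foldl (fun d pc => PySem.Dict.modify d (key pc) 0 (· + 1))
          ((PySem.List.pyRange 1 (n + 1) 1).foldl (fun d i => PySem.Dict.insert d i 0) (PySem.Dict.empty : PySem.Dict Int Int))).getD k 0)) := by
  have hfm : tcp.foldl (fun a pc => PySem.List.pySetD a (key pc - 1) (PySem.List.pyGetD a (key pc - 1) 0 + 1))
        (List.replicate n.toNat (0:Int))
      = (tcp.map key).foldl (fun a k => PySem.List.pySetD a (k - 1) (PySem.List.pyGetD a (k - 1) 0 + 1))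
        (List.replicate n.toNat (0:Int)) := by
    rw [List.foldl_map]
  have hfmd : ∀ d : PySem.Dict Int Int, tcp.foldl (fun d pc => PySem.Dict.modify d (key pc) 0 (· + 1)) d
      = (tcp.map key).foldl (fun d k => PySem.Dict.modify d k 0 (· + 1)) d := by
    intro d; rw [List.foldl_map]
  rw [hfm]
  apply List.ext_getElem
  · have h := foldInc_length (tcp.map key) (List.replicate n.toNat (0:Int))
    rw [h, List.length_replicate, List.length_map, PySem.List.length_pyRange_one]
    omega
  · intro j h1 h2
    have hlen : (List.replicate n.toNat (0:Int)).length = n.toNat := List.length_replicate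
    have hj : j < n.toNat := by
      rw [foldInc_length (tcp.map key), hlen] at h1; exact h1
    have hbl : ∀ k ∈ tcp.map key, 1 ≤ k ∧ k ≤ ((List.replicate n.toNat (0:Int)).length : Int) := by
      intro k hk
      obtain ⟨pc, hpc, rfl⟩ := List.mem_map.mp hk
      have := hb pc hpc
      rw [hlen]
      omega
    have hL : ((tcp.map key).foldl (fun a k => PySem.List.pySetD a (k - 1) (PySem.List.pyGetD a (k - 1) 0 + 1))
        (List.replicate n.toNat (0:Int)))[j] = (0:Int) + (tcp.map key).count ((j : Int) + 1) := by
      rw [← List.getD_eq_getElem _ 0 h1]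
      rw [foldInc_getD (tcp.map key) _ hbl j (by rw [hlen]; exact hj)]
      simp
    rw [hL]
    rw [List.getElem_map, PySem.List.getElem_pyRange_one]
    rw [hfmd, PySem.Dict.getD_foldl_modify_add_one]
    rw [getD_init_zero _ _ _ (by simp)]
    have : (1 : Int) + (j : Int) = (j : Int) + 1 := by ring
    simp [this]

-- keys of the count dict stay exactly range(1, n+1) under Pre_
theorem keys_counts (tcp : List (Int × Int)) (n : Int) (key : Int × Int → Int)
    (hb : ∀ pc ∈ tcp, 1 ≤ key pc ∧ key pc ≤ n) :
    (tcp.foldl (fun d pc => PySem.Dict.modify d (key pc) 0 (· + 1))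
        ((PySem.List.pyRange 1 (n + 1) 1).foldl (fun d i => PySem.Dict.insert d i 0) (PySem.Dict.empty : PySem.Dict Int Int))).keys
    = PySem.List.pyRange 1 (n + 1) 1 := by
  have hk0 : ((PySem.List.pyRange 1 (n + 1) 1).foldl (fun d i => PySem.Dict.insert d i 0) (PySem.Dict.empty : PySem.Dict Int Int)).keys
      = PySem.List.pyRange 1 (n + 1) 1 := by
    rw [PySem.Dict.keys_foldl_insert]
    rw [PySem.Dict.keys_empty]
    exact PySem.Set.ofList_eq_self_of_nodup _ (PySem.List.nodup_pyRange_one 1 (n + 1))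
  rw [PySem.Dict.keys_foldl_modify_key tcp key 0 (fun _ _ => (· + 1)) _]
  rw [hk0]
  apply set_update_id
  intro x hx
  obtain ⟨pc, hpc, rfl⟩ := List.mem_map.mp hx
  have := hb pc hpc
  rw [PySem.List.mem_pyRange_one]
  omega

-- the ports agree on every input satisfying Pre_
theorem getNumRides_eq_alt (tcp : List (Int × Int)) (ns nc : Int)
    (hpre : Pre_getNumRides tcp ns nc) :
    getNumRides tcp ns nc = getNumRides_alt tcp ns nc := by
  obtain ⟨hnc, hbnd⟩ := hpre
  simp only [getNumRides, getNumRides_alt]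
  have hspA := PySem.List.foldl_prod_mk
      (fun (d : PySem.Dict Int Int) (pc : Int × Int) => PySem.Dict.modify d pc.2 0 (· + 1))
      (fun (d : PySem.Dict Int Int) (pc : Int × Int) => PySem.Dict.modify d pc.1 0 (· + 1)) tcp
      ((PySem.List.pyRange 1 (nc + 1) 1).foldl (fun d i => PySem.Dict.insert d i 0) PySem.Dict.empty)
      ((PySem.List.pyRange 1 (ns + 1) 1).foldl (fun d i => PySem.Dict.insert d i 0) PySem.Dict.empty)
  have hspB := PySem.List.foldl_prod_mk
      (fun (a : List Int) (pc : Int × Int) => PySem.List.pySetD a (pc.2 - 1) (PySem.List.pyGetD a (pc.2 - 1) 0 + 1))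
      (fun (a : List Int) (pc : Int × Int) => PySem.List.pySetD a (pc.1 - 1) (PySem.List.pyGetD a (pc.1 - 1) 0 + 1)) tcp
      (List.replicate nc.toNat (0:Int)) (List.replicate ns.toNat (0:Int))
  simp only [] at hspA hspB
  rw [hspA, hspB]
  -- customer side: B's array equals the map of A's dict lookups over range(1, nc+1)
  have hcc := counts_eq tcp nc (fun pc => pc.2) (fun pc h => ⟨(hbnd pc h).2.2.1, (hbnd pc h).2.2.2⟩)
  have hsc := counts_eq tcp ns (fun pc => pc.1) (fun pc h => ⟨(hbnd pc h).1, (hbnd pc h).2.1⟩)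
  simp only [] at hcc hsc
  rw [hcc, hsc]
  set ccA : PySem.Dict Int Int := tcp.foldl (fun d pc => PySem.Dict.modify d pc.2 0 (· + 1))
      ((PySem.List.pyRange 1 (nc + 1) 1).foldl (fun d i => PySem.Dict.insert d i 0) PySem.Dict.empty) with hccA
  set scA : PySem.Dict Int Int := tcp.foldl (fun d pc => PySem.Dict.modify d pc.1 0 (· + 1))
      ((PySem.List.pyRange 1 (ns + 1) 1).foldl (fun d i => PySem.Dict.insert d i 0) PySem.Dict.empty) with hscA
  -- A's custCounts.values() is the same list B maxes over
  have hvals : PySem.Dict.values ccA = (PySem.List.pyRange 1 (nc + 1) 1).map (fun k => ccA.getD k 0) := by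
    have hnd : ccA.keys.Nodup := by
      rw [hccA]
      rw [keys_counts tcp nc (fun pc => pc.2) (fun pc h => ⟨(hbnd pc h).2.2.1, (hbnd pc h).2.2.2⟩)]
      exact PySem.List.nodup_pyRange_one 1 (nc + 1)
    rw [PySem.Dict.values_eq_map_keys ccA hnd 0]
    rw [hccA, keys_counts tcp nc (fun pc => pc.2) (fun pc h => ⟨(hbnd pc h).2.2.1, (hbnd pc h).2.2.2⟩)]
  rw [hvals]
  set lb0 : Int := (PySem.List.max? ((PySem.List.pyRange 1 (nc + 1) 1).map (fun k => ccA.getD k 0)) (fun y => y)).getD 0 with hlb0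
  -- main loop
  by_cases hns : ns + 1 ≤ 1
  · rw [PySem.List.pyRange_one_eq_nil hns]
    rfl
  · have hcast : ns + 1 = 1 + ((ns.toNat : ℕ) : Int) := by omega
    rw [hcast]
    rw [loopB_map (fun i => scA.getD i 0) ns.toNat 1 lb0 0]
    obtain ⟨lb', p', hA, hB, -⟩ :=
      loop_eq (fun i => scA.getD i 0) ns.toNat 1 lb0 0 le_rfl (by ring_nf; omega)
    simp only [] at hA hB
    rw [show ((1:Int) - 1) * lb0 - 0 = 0 by ring] at hA
    rw [hA, hB]
    -- upgrades
    simp only []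
    congr 1
    have hupg := upg_range (fun i => scA.getD i 0) lb' ns.toNat 1 0
    simp only [] at hupg
    rw [hupg, zero_add]

-- ===== VERDICT (by name: the statement is the Claim_ definition above) =====
theorem getNumRides_spec : Claim_equal_getNumRides := by
  intro tcp ns nc _ hpre
  exact getNumRides_eq_alt tcp ns nc hpre
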